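-- pv_equiv track=rewrite | github.com/yolkyal/advent_of_code_2023 | day_12/part_1.py | replace_question_marks
-- ===== SOURCE A (Python) =====
-- def replace_question_marks(pattern, hash_replace_indexes):
-- 	new_pattern = []
-- 	for i, c in enumerate(pattern):
-- 		if i in hash_replace_indexes:
-- 			new_pattern.append('#')
-- 		elif c == '?':
-- 			new_pattern.append('.')
-- 		else:
-- 			new_pattern.append(c)
-- 	return new_pattern
-- ===== SOURCE B (Python) =====
-- def replace_question_marks(pattern, hash_replace_indexes):
--     new_pattern = ['.' if c == '?' else c for c in pattern]
--     n = len(new_pattern)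
--     for i in hash_replace_indexes:
--         if 0 <= i < n:
--             new_pattern[i] = '#'
--     return new_pattern
-- ===== Notes on version B (the rewrite author's own statement) =====
-- stated objective: alternative
-- what changed: Instead of testing each position for membership in the index list while building the output, B builds the '?'->'.' base list in one pass and then overwrites the listed in-range positions with '#'.
import Mathlib
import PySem

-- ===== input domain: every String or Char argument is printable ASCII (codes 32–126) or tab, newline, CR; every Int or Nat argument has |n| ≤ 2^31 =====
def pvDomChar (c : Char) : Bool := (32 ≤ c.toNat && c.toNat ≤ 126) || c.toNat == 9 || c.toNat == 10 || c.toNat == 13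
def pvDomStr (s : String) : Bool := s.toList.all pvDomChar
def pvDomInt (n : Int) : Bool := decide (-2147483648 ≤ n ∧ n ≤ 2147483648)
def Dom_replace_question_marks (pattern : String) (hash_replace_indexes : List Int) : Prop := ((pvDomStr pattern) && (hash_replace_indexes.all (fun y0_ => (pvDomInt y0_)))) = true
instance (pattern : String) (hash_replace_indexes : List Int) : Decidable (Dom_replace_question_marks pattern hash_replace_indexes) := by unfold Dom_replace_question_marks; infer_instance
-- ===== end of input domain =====

-- B replaces A's per-character scan of the index list by a '?'->'.' pass plus direct writes of '#'
-- at the listed in-range positions (a different algorithm; the return value is proved equal).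

-- ===== PORT A =====
def replace_question_marks (pattern : String) (hash_replace_indexes : List Int) : List String :=
  (PySem.List.enumerate pattern.toList).foldl
    (fun new_pattern ic =>
      if ic.1 ∈ hash_replace_indexes then new_pattern ++ ["#"]
      else if ic.2 = '?' then new_pattern ++ ["."]
      else new_pattern ++ [String.mk [ic.2]]) []

-- ===== PORT B =====
def replace_question_marks_alt (pattern : String) (hash_replace_indexes : List Int) : List String :=
  let base := pattern.toList.map (fun c => if c = '?' then "." else String.mk [c])
  hash_replace_indexes.foldl
    (fun acc i => if 0 ≤ i ∧ i < (base.length : Int) then acc.set i.toNat "#" else acc) base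

-- ===== PRECONDITION & SPEC =====
def Spec_replace_question_marks (pattern : String) (hash_replace_indexes : List Int) (out : List String) : Prop := out = replace_question_marks_alt pattern hash_replace_indexes
instance (pattern : String) (hash_replace_indexes : List Int) (out : List String) : Decidable (Spec_replace_question_marks pattern hash_replace_indexes out) := by unfold Spec_replace_question_marks; infer_instance

-- ===== CLAIM (what is proved, stated in full; the proofs are below) =====
def Claim_equal_replace_question_marks : Prop := ∀ (pattern : String) (hash_replace_indexes : List Int), Dom_replace_question_marks pattern hash_replace_indexes → Spec_replace_question_marks pattern hash_replace_indexes (replace_question_marks pattern hash_replace_indexes)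

-- ===== LEMMAS AND PROOFS =====

-- A's per-position value: '#' at a listed index, else '?'->'.', else the character itself
def pvF (idxs : List Int) (j : Int) (c : Char) : String :=
  if j ∈ idxs then "#" else if c = '?' then "." else String.mk [c]

lemma A_foldl_map (idxs : List Int) (el : List (Int × Char)) (acc : List String) :
    el.foldl
      (fun new_pattern ic =>
        if ic.1 ∈ idxs then new_pattern ++ ["#"]
        else if ic.2 = '?' then new_pattern ++ ["."]
        else new_pattern ++ [String.mk [ic.2]]) acc
    = acc ++ el.map (fun ic => pvF idxs ic.1 ic.2) := by
  induction el generalizing acc with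
  | nil => simp
  | cons ic rest ih =>
      simp only [List.foldl_cons, List.map_cons, ih, pvF]
      split_ifs <;> simp

lemma A_eq (pattern : String) (idxs : List Int) :
    replace_question_marks pattern idxs
      = (PySem.List.enumerate pattern.toList).map (fun ic => pvF idxs ic.1 ic.2) := by
  simpa using A_foldl_map idxs (PySem.List.enumerate pattern.toList) []

lemma step_getElem? (i : Int) (n : Nat) (base : List String) (hn : base.length = n) (j : Nat) :
    (if 0 ≤ i ∧ i < (n : Int) then base.set i.toNat "#" else base)[j]?
      = if (j : Int) = i then base[j]?.map (fun _ => "#") else base[j]? := by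
  by_cases hji : (j : Int) = i
  · by_cases hjn : j < n
    · have hg : 0 ≤ i ∧ i < (n : Int) := by omega
      have ht : i.toNat = j := by omega
      have hj' : j < base.length := by omega
      simp [hg, ht, hji, List.getElem?_set, hj', List.getElem?_eq_getElem hj']
    · have hnone : base[j]? = none := by
        rw [List.getElem?_eq_none_iff]; omega
      split_ifs with hg
      · have ht : i.toNat = j := by omega
        simp [hji, ht, List.getElem?_set, hnone, show ¬ j < base.length by omega]
      · simp [hji, hnone]
  · simp only [hji, if_false]
    split_ifs with hg
    · have ht : i.toNat ≠ j := by omega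
      simp [List.getElem?_set, ht]
    · rfl

lemma fold_set (idxs : List Int) (n : Nat) (base : List String) (hn : base.length = n) (j : Nat) :
    (idxs.foldl (fun acc i => if 0 ≤ i ∧ i < (n : Int) then acc.set i.toNat "#" else acc) base)[j]?
      = base[j]?.map (fun v => if (j : Int) ∈ idxs then "#" else v) := by
  induction idxs generalizing base with
  | nil => cases h : base[j]? <;> simp [h]
  | cons i rest ih =>
      have hstep : (if 0 ≤ i ∧ i < (n : Int) then base.set i.toNat "#" else base).length = n := by
        split_ifs <;> simp [hn]
      simp only [List.foldl_cons]
      rw [ih _ hstep, step_getElem? i n base hn j]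
      by_cases hji : (j : Int) = i
      · cases h : base[j]? <;> simp [h, hji]
      · by_cases hmem : (j : Int) ∈ rest <;>
          cases h : base[j]? <;> simp [h, hji, hmem]

-- ===== VERDICT (by name: the statement is the Claim_ definition above) =====
theorem replace_question_marks_spec : Claim_equal_replace_question_marks := by
  intro pattern idxs _hdom
  unfold Spec_replace_question_marks
  rw [A_eq]
  simp only [replace_question_marks_alt]
  apply List.ext_getElem?
  intro j
  rw [fold_set idxs (pattern.toList.map (fun c => if c = '?' then "." else String.mk [c])).length _ rfl j]
  simp only [PySem.List.getElem?_enumerate, List.getElem?_map, List.map_map, Option.map_map]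
  cases h : pattern.toList[j]? with
  | none => simp [h]
  | some c => simp [h, pvF, Function.comp]
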